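-- pv_equiv track=rewrite | github.com/TUD-INF-IAI-MCI/AGSBS-infrastructure | MAGSBS/datastructures.py | gen_id
-- ===== SOURCE A (Python) =====
-- def gen_id(text, attributes=None):
--     """gen_id(text) -> label
-- This function tries to generate the same labels as pandoc for anchors.
-- If id is presented within list of attributes (in a form "#id"), than it is
-- used for generation and the text itself is ignored."""
--     if attributes:  # generation of id if it is in the list of attributes
--         for attr in attributes:
--             if attr.startswith("#"):
--                 return attr[1:]
--
--     allowed_characters = [".", "-", "_"]
--     text = text.lower()
--     res_id = []  # does not contain double dash
--     last_processed_char = ""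
--     for char in text:
--         # insert hyphen if it is space AND last char was not a space
--         if char.isspace() and not last_processed_char.isspace():
--             res_id.append("-")
--         elif char.isalpha() or char.isdigit() or char in allowed_characters:
--             res_id.append(char)
--         else:
--             continue
--         # the else case explicitely does not count as processed char (all those
--         # which are going to be ignored)
--         last_processed_char = char
--     # strip hyphens at the beginning, as well as numbers
--     while res_id and not res_id[0].isalpha():
--         res_id.pop(0)
--     return "".join(res_id)
-- ===== SOURCE B (Python) =====
-- def gen_id(text, attributes=None):
--     if attributes:  # id given in attributes wins
--         for attr in attributes:
--             if attr.startswith("#"):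
--                 return attr[1:]
--     # phase 1: stateless filter — normalise whitespace to ' ', keep allowed chars
--     kept = []
--     for char in text.lower():
--         if char.isspace():
--             kept.append(" ")
--         elif char.isalpha() or char.isdigit() or char in ".-_":
--             kept.append(char)
--     # phase 2: collapse runs of spaces to a single space
--     out = []
--     for char in kept:
--         if char == " " and out and out[-1] == " ":
--             continue
--         out.append(char)
--     # phase 3: turn spaces into hyphens
--     s = "".join("-" if ch == " " else ch for ch in out)
--     # phase 4: drop leading non-alphabetic characters
--     i = 0
--     while i < len(s) and not s[i].isalpha():
--         i += 1
--     return s[i:]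
-- ===== Notes on version B (the rewrite author's own statement) =====
-- stated objective: simpler
-- what changed: Replaces A's single stateful pass (last_processed_char bookkeeping) plus destructive pop(0) stripping by four stateless phases: filter/normalise whitespace to spaces, collapse adjacent space runs, map spaces to hyphens, then slice from the first alphabetic character.
import Mathlib
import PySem

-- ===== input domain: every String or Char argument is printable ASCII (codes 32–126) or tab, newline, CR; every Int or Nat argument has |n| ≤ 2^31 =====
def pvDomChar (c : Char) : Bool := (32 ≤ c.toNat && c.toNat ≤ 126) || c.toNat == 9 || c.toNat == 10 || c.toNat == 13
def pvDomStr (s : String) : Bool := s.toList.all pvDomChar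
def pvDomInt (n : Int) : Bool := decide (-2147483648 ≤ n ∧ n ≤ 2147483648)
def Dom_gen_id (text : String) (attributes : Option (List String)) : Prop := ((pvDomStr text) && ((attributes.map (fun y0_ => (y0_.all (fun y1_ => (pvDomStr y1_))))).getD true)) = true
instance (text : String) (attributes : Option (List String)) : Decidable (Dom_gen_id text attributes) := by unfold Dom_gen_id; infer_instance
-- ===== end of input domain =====

-- B replaces A's stateful single pass (last_processed_char) + pop(0) stripping by four
-- stateless phases (filter, collapse space runs, hyphenate, slice from first letter); objective: simpler.

-- ===== PORT A =====
-- first attribute starting with '#', without the '#'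
def aAttrId : List String → Option String
  | [] => none
  | attr :: rest =>
    if PySem.Str.startswith attr "#" then some (PySem.Str.slice attr (some 1) none)
    else aAttrId rest

-- last_processed_char.isspace(); the initial "" is not a space
def aLastIsSpace : Option Char → Bool
  | none => false
  | some c => PySem.Chars.isspace c

def aKeepChar (c : Char) : Bool :=
  PySem.Chars.isalpha c || PySem.Chars.isdigit c || decide (c ∈ ['.', '-', '_'])

-- the for-loop over text with state (res_id, last_processed_char)
def aLoop : List Char → List Char → Option Char → List Char
  | [], res, _ => res
  | c :: cs, res, last =>
    if PySem.Chars.isspace c && !aLastIsSpace last then aLoop cs (res ++ ['-']) (some c)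
    else if aKeepChar c then aLoop cs (res ++ [c]) (some c)
    else aLoop cs res last

-- while res_id and not res_id[0].isalpha(): res_id.pop(0)
def aStrip : List Char → List Char
  | [] => []
  | c :: cs => if !PySem.Chars.isalpha c then aStrip cs else c :: cs

def gen_id (text : String) (attributes : Option (List String)) : String :=
  match (match attributes with | some attrs => aAttrId attrs | none => none) with
  | some r => r
  | none => String.ofList (aStrip (aLoop (PySem.Chars.lower text.toList) [] none))

-- ===== PORT B =====
def bAttrId : List String → Option String
  | [] => none
  | attr :: rest =>
    if PySem.Str.startswith attr "#" then some (PySem.Str.slice attr (some 1) none)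
    else bAttrId rest

def bKeepChar (c : Char) : Bool :=
  PySem.Chars.isalpha c || PySem.Chars.isdigit c || decide (c ∈ ['.', '-', '_'])

-- phase 1 loop body: whitespace → ' ', allowed chars kept, the rest dropped
def bKeepStep (kept : List Char) (c : Char) : List Char :=
  if PySem.Chars.isspace c then kept ++ [' ']
  else if bKeepChar c then kept ++ [c] else kept

-- phase 2 loop body: skip a space that follows a space
def bColStep (out : List Char) (c : Char) : List Char :=
  if c == ' ' && !out.isEmpty && (out.getLast? == some ' ') then out else out ++ [c]

-- phase 4: index of the first alphabetic character (length if none)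
def bFirstAlpha : List Char → Nat
  | [] => 0
  | c :: cs => if !PySem.Chars.isalpha c then bFirstAlpha cs + 1 else 0

def gen_id_alt (text : String) (attributes : Option (List String)) : String :=
  match (match attributes with | some attrs => bAttrId attrs | none => none) with
  | some r => r
  | none =>
    let kept := (PySem.Chars.lower text.toList).foldl bKeepStep []
    let out := kept.foldl bColStep []
    let s := out.map (fun ch => if ch == ' ' then '-' else ch)
    String.ofList (s.drop (bFirstAlpha s))

-- ===== PRECONDITION & SPEC =====
def Spec_gen_id (text : String) (attributes : Option (List String)) (out : String) : Prop := out = gen_id_alt text attributes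
instance (text : String) (attributes : Option (List String)) (out : String) : Decidable (Spec_gen_id text attributes out) := by unfold Spec_gen_id; infer_instance

-- ===== CLAIM (what is proved, stated in full; the proofs are below) =====
def Claim_equal_gen_id : Prop := ∀ (text : String) (attributes : Option (List String)), Dom_gen_id text attributes → Spec_gen_id text attributes (gen_id text attributes)

-- ===== LEMMAS AND PROOFS =====

lemma attrId_eq (attrs : List String) : aAttrId attrs = bAttrId attrs := by
  induction attrs with
  | nil => rfl
  | cons a rest ih => simp [aAttrId, bAttrId, ih]

-- a whitespace char is never kept by the elif branch
lemma isspace_not_keep (c : Char) (h : PySem.Chars.isspace c = true) : aKeepChar c = false := by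
  simp only [aKeepChar, Bool.or_eq_false_iff]
  refine ⟨⟨?_, ?_⟩, ?_⟩
  · simp only [PySem.Chars.isspace, Char.toNat, decide_eq_true_eq, Bool.or_eq_true,
      Bool.and_eq_true] at h
    simp only [PySem.Chars.isalpha, PySem.Chars.isupper, PySem.Chars.islower, Char.le_def,
      UInt32.le_iff_toNat_le, Bool.or_eq_false_iff, Bool.and_eq_false_iff,
      decide_eq_false_iff_not, not_le,
      show 'A'.val.toNat = 65 from rfl, show 'Z'.val.toNat = 90 from rfl,
      show 'a'.val.toNat = 97 from rfl, show 'z'.val.toNat = 122 from rfl]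
    omega
  · simp only [PySem.Chars.isspace, Char.toNat, decide_eq_true_eq, Bool.or_eq_true,
      Bool.and_eq_true] at h
    simp only [PySem.Chars.isdigit, Char.le_def, UInt32.le_iff_toNat_le,
      Bool.and_eq_false_iff, decide_eq_false_iff_not, not_le,
      show '0'.val.toNat = 48 from rfl, show '9'.val.toNat = 57 from rfl]
    omega
  · simp only [decide_eq_false_iff_not, List.mem_cons, List.not_mem_nil, or_false]
    rintro (rfl | rfl | rfl) <;> simp [PySem.Chars.isspace] at h

lemma not_isspace_ne_space (c : Char) (h : PySem.Chars.isspace c = false) : c ≠ ' ' := by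
  rintro rfl; simp [PySem.Chars.isspace] at h

lemma bKeep_eq_aKeep (c : Char) : bKeepChar c = aKeepChar c := rfl

-- what A's loop appends, as a function of the chars and the "last processed char was a space" flag
def coreF : List Char → Bool → List Char
  | [], _ => []
  | c :: cs, b =>
    if PySem.Chars.isspace c && !b then '-' :: coreF cs true
    else if aKeepChar c then c :: coreF cs (PySem.Chars.isspace c)
    else coreF cs b

-- B's phase 1 as a structural function
def keepF : List Char → List Char
  | [] => []
  | c :: cs =>
    if PySem.Chars.isspace c then ' ' :: keepF cs
    else if bKeepChar c then c :: keepF cs else keepF cs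

-- B's phase 2 as a structural function of the "last emitted char was a space" flag
def colF : List Char → Bool → List Char
  | [], _ => []
  | c :: cs, b => if c == ' ' && b then colF cs b else c :: colF cs (c == ' ')

lemma aLastIsSpace_some (c : Char) : aLastIsSpace (some c) = PySem.Chars.isspace c := rfl

lemma aLoop_eq (cs : List Char) : ∀ res last,
    aLoop cs res last = res ++ coreF cs (aLastIsSpace last) := by
  induction cs with
  | nil => intro res last; simp [aLoop, coreF]
  | cons c cs ih =>
    intro res last
    by_cases hs : PySem.Chars.isspace c = true
    · by_cases hb : aLastIsSpace last = true
      · simp [aLoop, coreF, hs, hb, ih, aLastIsSpace_some]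
        split_ifs <;> simp
      · simp only [Bool.not_eq_true] at hb
        simp [aLoop, coreF, hs, hb, ih, aLastIsSpace_some]
    · simp only [Bool.not_eq_true] at hs
      by_cases hk : aKeepChar c = true
      · simp [aLoop, coreF, hs, hk, ih, aLastIsSpace_some]
      · simp only [Bool.not_eq_true] at hk
        simp [aLoop, coreF, hs, hk, ih]

lemma keep_foldl_eq (cs : List Char) : ∀ acc,
    cs.foldl bKeepStep acc = acc ++ keepF cs := by
  induction cs with
  | nil => intro acc; simp [keepF]
  | cons c cs ih =>
    intro acc
    by_cases h1 : PySem.Chars.isspace c = true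
    · simp [List.foldl_cons, bKeepStep, keepF, h1, ih]
    · by_cases h2 : bKeepChar c = true
      · simp [List.foldl_cons, bKeepStep, keepF, h1, h2, ih]
      · simp [List.foldl_cons, bKeepStep, keepF, h1, h2, ih]

lemma col_foldl_eq (ks : List Char) : ∀ out,
    ks.foldl bColStep out = out ++ colF ks (out.getLast? == some ' ') := by
  induction ks with
  | nil => intro out; simp [colF]
  | cons c ks ih =>
    intro out
    by_cases h : (c == ' ' && !out.isEmpty && (out.getLast? == some ' ')) = true
    · have hc : c = ' ' := by
        rcases Bool.and_eq_true_iff.mp h with ⟨h', _⟩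
        rcases Bool.and_eq_true_iff.mp h' with ⟨hc, _⟩
        exact beq_iff_eq.mp hc
      have hl : (out.getLast? == some ' ') = true := by
        rcases Bool.and_eq_true_iff.mp h with ⟨_, hl⟩; exact hl
      have hstep : bColStep out c = out := by simp [bColStep, h]
      rw [List.foldl_cons, hstep, ih out, hl]
      simp [colF, hc]
    · have hstep : bColStep out c = out ++ [c] := by
        unfold bColStep; rw [if_neg h]
      have hl2 : ((out ++ [c]).getLast? == some ' ') = (c == ' ') := by simp
      have hcond : (c == ' ' && (out.getLast? == some ' ')) = false := by
        by_cases hf : (out.getLast? == some ' ') = true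
        · have hne : out.isEmpty = false := by
            cases out with
            | nil => simp at hf
            | cons _ _ => rfl
          by_cases hcc : (c == ' ') = true
          · exact absurd (by simp [hcc, hne, hf]) h
          · simp only [Bool.not_eq_true] at hcc
            simp [hcc]
        · simp only [Bool.not_eq_true] at hf
          simp [hf]
      have hcol : colF (c :: ks) (out.getLast? == some ' ') = c :: colF ks (c == ' ') := by
        simp [colF, hcond]
      rw [List.foldl_cons, hstep, ih (out ++ [c]), hl2, hcol]
      simp

lemma core_eq_colF_keepF (cs : List Char) : ∀ b,
    coreF cs b = (colF (keepF cs) b).map (fun ch => if ch == ' ' then '-' else ch) := by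
  induction cs with
  | nil => intro b; simp [coreF, keepF, colF]
  | cons c cs ih =>
    intro b
    by_cases hs : PySem.Chars.isspace c = true
    · have hk : aKeepChar c = false := isspace_not_keep c hs
      cases b with
      | false => simp [coreF, keepF, colF, hs, ih]
      | true => simp [coreF, keepF, colF, hs, hk, ih]
    · simp only [Bool.not_eq_true] at hs
      have hne : (c == ' ') = false := by
        simp only [beq_eq_false_iff_ne, ne_eq]
        exact not_isspace_ne_space c hs
      have hne' : c ≠ ' ' := not_isspace_ne_space c hs
      by_cases hk : aKeepChar c = true
      · simp [coreF, keepF, colF, hs, hk, bKeep_eq_aKeep, hne, hne', ih]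
      · simp only [Bool.not_eq_true] at hk
        simp [coreF, keepF, hs, hk, bKeep_eq_aKeep, ih]

lemma strip_eq_drop (s : List Char) : aStrip s = s.drop (bFirstAlpha s) := by
  induction s with
  | nil => rfl
  | cons c cs ih =>
    by_cases h : PySem.Chars.isalpha c = true
    · simp [aStrip, bFirstAlpha, h]
    · simp only [Bool.not_eq_true] at h
      simp [aStrip, bFirstAlpha, h, ih]

lemma body_eq (t : List Char) :
    aStrip (aLoop t [] none) =
      ((((t.foldl bKeepStep []).foldl bColStep []).map
          (fun ch => if ch == ' ' then '-' else ch)).drop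
        (bFirstAlpha (((t.foldl bKeepStep []).foldl bColStep []).map
          (fun ch => if ch == ' ' then '-' else ch)))) := by
  rw [aLoop_eq, keep_foldl_eq, col_foldl_eq]
  simp only [List.nil_append, List.getLast?_nil]
  rw [strip_eq_drop, core_eq_colF_keepF]
  simp [aLastIsSpace]

-- ===== VERDICT (by name: the statement is the Claim_ definition above) =====
theorem gen_id_spec : Claim_equal_gen_id := by
  intro text attributes _
  unfold Spec_gen_id gen_id gen_id_alt
  cases attributes with
  | none => exact congrArg String.ofList (body_eq _)
  | some attrs =>
    show (match aAttrId attrs with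
          | some r => r
          | none => String.ofList (aStrip (aLoop (PySem.Chars.lower text.toList) [] none))) = _
    rw [attrId_eq]
    cases h : bAttrId attrs with
    | some r => simp [h]
    | none => simp only [h]; exact congrArg String.ofList (body_eq _)
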